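-- pv_equiv track=rewrite | github.com/Adamtaranto/Corset-tools | transDistCalc.py | trimAlign
-- ===== SOURCE A (Python) =====
-- def trimAlign(firstAlign):
-- 	#Scrub trailing and leading gaps
-- 	#Scrub double gap positions
-- 	nonGapPosition = 0
-- 	newA = list()
-- 	newB = list()
-- 	#For each position pair
-- 	for seqA,seqB in firstAlign:
-- 		for (a,b) in zip(seqA, seqB):
-- 			#If one character is not a gap
-- 			if a != "-" or b != "-":
-- 				#Log if this is the first zero gap position
-- 				if a != "-" and b != "-":
-- 					nonGapPosition =+ 1
-- 				#If this is any position after and including the first zero-gap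
-- 				#write to new position list
-- 				if nonGapPosition > 0:
-- 				 	newA.append(a)
-- 				 	newB.append(b)
--
-- 	#Convert list of positions back to string
-- 	trimmedA = ''.join(newA)
-- 	trimmedB = ''.join(newB)
--
-- 	#Flip and repeat from other end
-- 	revAlign = [(trimmedA[::-1],trimmedB[::-1])]
--
-- 	nonGapPosition = 0
-- 	revlistA = list()
-- 	revlistB = list()
--
-- 	#For each position pair
-- 	for revA,revB in revAlign:
-- 		for (a,b) in zip(revA, revB):
-- 			#If one character is not a gap
-- 			if a != "-" or b != "-":
-- 				#Log if this is the first zero gap position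
-- 				if a != "-" and b != "-":
-- 					nonGapPosition =+ 1
-- 				#If this is any position after and including the first zero-gap
-- 				#write to new position list
-- 				if nonGapPosition > 0:
-- 				 	revlistA.append(a)
-- 				 	revlistB.append(b)
--
-- 	finalA = ''.join(revlistA)
-- 	finalB = ''.join(revlistB)
--
-- 	#Make tuple
-- 	finalAlign = [(finalA[::-1],finalB[::-1])]
--
-- 	return finalAlign
-- ===== SOURCE B (Python) =====
-- def trimAlign(firstAlign):
--     cols = [(a, b) for seqA, seqB in firstAlign for a, b in zip(seqA, seqB)]
--     both = [i for i, (a, b) in enumerate(cols) if a != "-" and b != "-"]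
--     if not both:
--         return [("", "")]
--     kept = [c for c in cols[both[0]:both[-1] + 1] if c != ("-", "-")]
--     return [("".join(a for a, _ in kept), "".join(b for _, b in kept))]
-- ===== Notes on version B (the rewrite author's own statement) =====
-- stated objective: simpler
-- what changed: B flattens the alignment into one column list, finds the first and last fully non-gap column via enumerate, and builds the result with a single slice-and-filter, replacing A's two stateful append loops with a string reversal between them.
import Mathlib
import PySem

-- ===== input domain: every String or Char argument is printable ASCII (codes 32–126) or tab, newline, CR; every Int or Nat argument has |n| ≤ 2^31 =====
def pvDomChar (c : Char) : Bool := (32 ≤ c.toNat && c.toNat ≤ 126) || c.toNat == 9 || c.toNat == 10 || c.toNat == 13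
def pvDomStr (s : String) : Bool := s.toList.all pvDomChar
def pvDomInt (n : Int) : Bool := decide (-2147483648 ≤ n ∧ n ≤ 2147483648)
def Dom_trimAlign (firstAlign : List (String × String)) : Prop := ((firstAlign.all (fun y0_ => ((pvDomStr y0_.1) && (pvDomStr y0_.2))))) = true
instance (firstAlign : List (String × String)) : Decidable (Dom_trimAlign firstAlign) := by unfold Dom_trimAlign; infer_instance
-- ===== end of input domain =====

-- B trims the alignment in one pass over the flattened columns: it locates the first and last
-- fully non-gap column and filters double-gap columns from that span, instead of A's two
-- append-loops with a reversal in between (objective: simpler).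

-- ===== PORT A =====
-- one iteration of A's inner loop body (the loop body is identical in both of A's passes)
def pvStepA (st : Int × List Char × List Char) (c : Char × Char) : Int × List Char × List Char :=
  if c.1 ≠ '-' ∨ c.2 ≠ '-' then
    let n : Int := if c.1 ≠ '-' ∧ c.2 ≠ '-' then 1 else st.1
    if n > 0 then (n, st.2.1 ++ [c.1], st.2.2 ++ [c.2]) else (n, st.2.1, st.2.2)
  else st

def trimAlign (firstAlign : List (String × String)) : List (String × String) :=
  -- first pass over firstAlign; zip(seqA, seqB) is List.zip on the code points
  let st1 := firstAlign.foldl (fun st p => (p.1.toList.zip p.2.toList).foldl pvStepA st) (0, [], [])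
  -- ''.join(list of single chars) is String.ofList, exact
  let trimmedA := String.ofList st1.2.1
  let trimmedB := String.ofList st1.2.2
  -- s[::-1] reverses the code points: exact per PySem.Str.slice?_none_none_neg_one
  let revAlign := [(String.ofList trimmedA.toList.reverse, String.ofList trimmedB.toList.reverse)]
  -- second pass, same loop body
  let st2 := revAlign.foldl (fun st p => (p.1.toList.zip p.2.toList).foldl pvStepA st) (0, [], [])
  [(String.ofList st2.2.1.reverse, String.ofList st2.2.2.reverse)]

-- ===== PORT B =====
def trimAlign_alt (firstAlign : List (String × String)) : List (String × String) :=
  let cols := firstAlign.flatMap (fun p => p.1.toList.zip p.2.toList)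
  let both := ((PySem.List.enumerate cols 0).filter
                (fun ic => decide (ic.2.1 ≠ '-' ∧ ic.2.2 ≠ '-'))).map (·.1)
  match both with
  | [] => [("", "")]
  | b0 :: rest =>
    let b1 := rest.getLastD b0
    let kept := (PySem.List.slice cols (some b0) (some (b1 + 1))).filter
                  (fun c => decide (c ≠ ('-', '-')))
    [(String.ofList (kept.map (·.1)), String.ofList (kept.map (·.2)))]

-- ===== PRECONDITION & SPEC =====
def Spec_trimAlign (firstAlign : List (String × String)) (out : List (String × String)) : Prop := out = trimAlign_alt firstAlign
instance (firstAlign : List (String × String)) (out : List (String × String)) : Decidable (Spec_trimAlign firstAlign out) := by unfold Spec_trimAlign; infer_instance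

-- ===== CLAIM (what is proved, stated in full; the proofs are below) =====
def Claim_equal_trimAlign : Prop := ∀ (firstAlign : List (String × String)), Dom_trimAlign firstAlign → Spec_trimAlign firstAlign (trimAlign firstAlign)

-- ===== LEMMAS AND PROOFS =====

-- pvP c: the column is fully non-gap; pvQ c: the column is not a double gap
def pvP (c : Char × Char) : Bool := decide (c.1 ≠ '-' ∧ c.2 ≠ '-')
def pvQ (c : Char × Char) : Bool := decide (c.1 ≠ '-' ∨ c.2 ≠ '-')

-- the list of (Nat) indices of fully non-gap columns
def pvIdxs : List (Char × Char) → List Nat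
  | [] => []
  | c :: r => if pvP c then 0 :: (pvIdxs r).map (· + 1) else (pvIdxs r).map (· + 1)

theorem pvQ_eq (c : Char × Char) : (decide (c ≠ ('-', '-'))) = pvQ c := by
  obtain ⟨a, b⟩ := c
  simp [pvQ, Prod.ext_iff]

-- A's loop with the flag already set appends every non-double-gap column
theorem stepA_flag1 (cols : List (Char × Char)) : ∀ (as bs : List Char),
    cols.foldl pvStepA (1, as, bs)
      = (1, as ++ (cols.filter pvQ).map (·.1), bs ++ (cols.filter pvQ).map (·.2)) := by
  induction cols with
  | nil => intro as bs; simp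
  | cons c r ih =>
    intro as bs
    by_cases hq : pvQ c = true
    · have hq' : (c.1 ≠ '-' ∨ c.2 ≠ '-') := by simpa [pvQ] using hq
      by_cases hp : (c.1 ≠ '-' ∧ c.2 ≠ '-')
      · simp [pvStepA, hq', hp, hq, ih]
      · simp [pvStepA, hq', hp, hq, ih]
    · have hq' : ¬(c.1 ≠ '-' ∨ c.2 ≠ '-') := by simpa [pvQ] using hq
      simp [pvStepA, hq', hq, ih]

-- A's loop from flag 0: skip until the first fully non-gap column, then behave as flag 1
theorem stepA_flag0 (cols : List (Char × Char)) : ∀ (as bs : List Char),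
    cols.foldl pvStepA (0, as, bs)
      = ((if cols.any pvP then 1 else 0),
         as ++ (((cols.dropWhile (fun c => !pvP c)).filter pvQ).map (·.1)),
         bs ++ (((cols.dropWhile (fun c => !pvP c)).filter pvQ).map (·.2))) := by
  induction cols with
  | nil => intro as bs; simp
  | cons c r ih =>
    intro as bs
    by_cases hp : pvP c = true
    · have hp' : (c.1 ≠ '-' ∧ c.2 ≠ '-') := by simpa [pvP] using hp
      have hq : pvQ c = true := by simp [pvQ]; tauto
      simp [pvStepA, hp', hp, hq, stepA_flag1]
    · have hp' : ¬(c.1 ≠ '-' ∧ c.2 ≠ '-') := by simpa [pvP] using hp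
      by_cases hq : (c.1 ≠ '-' ∨ c.2 ≠ '-')
      · simp [pvStepA, hp', hp, hq, ih]
      · simp [pvStepA, hp, hq, ih]

-- pvIdxs is what B's enumerate/filter/map computes (Int-cast, any start)
theorem pvIdxs_enumerate (cols : List (Char × Char)) : ∀ (s : Int),
    ((PySem.List.enumerate cols s).filter (fun ic => pvP ic.2)).map (·.1)
      = (pvIdxs cols).map (fun (k : Nat) => s + (k : Int)) := by
  induction cols with
  | nil => intro s; simp [PySem.List.enumerate_nil, pvIdxs]
  | cons c r ih =>
    intro s
    rw [PySem.List.enumerate_cons, List.filter_cons]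
    by_cases hp : pvP c = true
    · simp only [hp, pvIdxs, if_true, List.map_cons, ih (s + 1), List.map_map]
      refine congrArg₂ _ (by simp) ?_
      apply List.map_congr_left; intro k _; simp [Function.comp]; ring
    · simp only [hp, pvIdxs, if_false, Bool.false_eq_true, ih (s + 1), List.map_map]
      apply List.map_congr_left; intro k _; simp [Function.comp]; ring

theorem pvIdxs_nil_iff (cols : List (Char × Char)) :
    pvIdxs cols = [] ↔ ∀ c ∈ cols, pvP c = false := by
  induction cols with
  | nil => simp [pvIdxs]
  | cons c r ih =>
    by_cases hp : pvP c = true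
    · simp [pvIdxs, hp]
    · simp only [pvIdxs, hp, if_false, Bool.false_eq_true, List.map_eq_nil_iff]
      rw [ih]
      constructor
      · intro h x hx
        rcases List.mem_cons.mp hx with rfl | hx'
        · exact Bool.eq_false_iff.mpr hp
        · exact h x hx'
      · intro h x hx; exact h x (List.mem_cons_of_mem _ hx)

theorem pv_getLastD_map (l : List Nat) (d : Nat) (h : l ≠ []) :
    (l.map (· + 1)).getLastD d = l.getLastD 0 + 1 := by
  induction l with
  | nil => simp at h
  | cons a t ih =>
    cases t with
    | nil => simp
    | cons b u => simpa using ih (by simp)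

-- last index: trimming from the back keeps exactly the first (last + 1) elements
theorem pvIdxs_last (cols : List (Char × Char)) : ∀ n0 r, pvIdxs cols = n0 :: r →
    ((cols.reverse.dropWhile (fun c => !pvP c))).reverse
      = cols.take (r.getLastD n0 + 1) := by
  induction cols with
  | nil => intro n0 r h; simp [pvIdxs] at h
  | cons c t ih =>
    intro n0 r h
    have hrev : (c :: t).reverse = t.reverse ++ [c] := by simp
    have hlast_cons : r.getLastD n0 = (pvIdxs (c :: t)).getLastD 0 := by
      rw [h, List.getLastD_cons]
    by_cases hne : pvIdxs t = []
    · have hallt : ∀ x ∈ t, pvP x = false := (pvIdxs_nil_iff t).mp hne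
      by_cases hp : pvP c = true
      · simp [pvIdxs, hp, hne] at h
        have hdw : t.reverse.dropWhile (fun c => !pvP c) = [] := by
          rw [List.dropWhile_eq_nil_iff]
          intro x hx; simp [hallt x (List.mem_reverse.mp hx)]
        rw [hrev, List.dropWhile_append, hdw]
        simp [hp, ← h.1, h.2]
      · simp [pvIdxs, hp, hne] at h
    · obtain ⟨m0, mr, hm⟩ := List.exists_cons_of_ne_nil hne
      have hdw_ne : t.reverse.dropWhile (fun c => !pvP c) ≠ [] := by
        rw [Ne, List.dropWhile_eq_nil_iff]
        intro hall
        apply hne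
        apply (pvIdxs_nil_iff t).mpr
        intro x hx
        have := hall x (List.mem_reverse.mpr hx)
        simpa using this
      have hsplit : (c :: t).reverse.dropWhile (fun c => !pvP c)
          = t.reverse.dropWhile (fun c => !pvP c) ++ [c] := by
        rw [hrev, List.dropWhile_append]
        simp [List.isEmpty_iff, hdw_ne]
      have hlast : r.getLastD n0 = mr.getLastD m0 + 1 := by
        rw [hlast_cons]
        have hmap : ((pvIdxs t).map (· + 1)).getLastD 0 = (pvIdxs t).getLastD 0 + 1 :=
          pv_getLastD_map _ _ hne
        have h2 : (pvIdxs (c :: t)).getLastD 0 = (pvIdxs t).getLastD 0 + 1 := by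
          by_cases hp : pvP c = true
          · simp only [pvIdxs, hp, if_true, List.getLastD_cons, hmap]
          · simp only [pvIdxs, hp, if_false, Bool.false_eq_true, hmap]
        rw [h2, hm, List.getLastD_cons]
      rw [hsplit, List.reverse_append, List.reverse_singleton, List.singleton_append,
        ih m0 mr hm, hlast]
      simp [List.take_succ_cons]

theorem pv_getLastD_map' (l : List Nat) (d : Nat) :
    (l.map (· + 1)).getLastD (d + 1) = l.getLastD d + 1 := by
  induction l generalizing d with
  | nil => simp
  | cons a t ih => simp only [List.map_cons, List.getLastD_cons]; exact ih a

-- the two trims compose to the span between the first and last fully non-gap column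
theorem pv_main (cols : List (Char × Char)) : ∀ n0 r, pvIdxs cols = n0 :: r →
    (((cols.dropWhile (fun c => !pvP c)).reverse.dropWhile (fun c => !pvP c))).reverse
      = (cols.drop n0).take (r.getLastD n0 + 1 - n0) := by
  induction cols with
  | nil => intro n0 r h; simp [pvIdxs] at h
  | cons c t ih =>
    intro n0 r h
    by_cases hp : pvP c = true
    · have h0 : n0 = 0 := by simp [pvIdxs, hp] at h; omega
      subst h0
      rw [show (c :: t).dropWhile (fun c => !pvP c) = c :: t by simp [hp]]
      rw [pvIdxs_last _ _ _ h]
      simp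
    · simp only [pvIdxs, hp, if_false, Bool.false_eq_true] at h
      obtain ⟨n0', r0, hidx, hn0, hr⟩ := List.map_eq_cons_iff.mp h
      rw [show (c :: t).dropWhile (fun c => !pvP c) = t.dropWhile (fun c => !pvP c) by
        simp [hp]]
      rw [ih _ _ hidx, ← hn0, ← hr]
      rw [show (c :: t).drop (n0' + 1) = t.drop n0' from rfl]
      congr 1
      rw [pv_getLastD_map']
      omega

-- dropWhile (!pvP) commutes with filter pvQ (since pvP implies pvQ)
theorem pv_dropWhile_filter (cols : List (Char × Char)) :
    (cols.filter pvQ).dropWhile (fun c => !pvP c)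
      = (cols.dropWhile (fun c => !pvP c)).filter pvQ := by
  induction cols with
  | nil => simp
  | cons c t ih =>
    by_cases hq : pvQ c = true
    · by_cases hp : pvP c = true
      · simp [hq, hp]
      · simp [hq, hp, ih]
    · have hp : pvP c = false := by
        simp [pvP, pvQ] at *; tauto
      simp [hq, hp, ih]

theorem trimAlign_spec' (fa : List (String × String)) :
    trimAlign fa = trimAlign_alt fa := by
  have hPdef : (fun (ic : Int × Char × Char) => decide (ic.2.1 ≠ '-' ∧ ic.2.2 ≠ '-'))
      = (fun ic => pvP ic.2) := rfl
  have hQdef : (fun (c : Char × Char) => decide (c ≠ ('-', '-'))) = pvQ :=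
    funext fun c => pvQ_eq c
  set cols := fa.flatMap (fun p => p.1.toList.zip p.2.toList) with hcols
  set k1 := ((cols.dropWhile (fun c => !pvP c)).filter pvQ) with hk1
  -- A's value, in closed form
  have hA : trimAlign fa
      = [(String.ofList (((k1.reverse.dropWhile (fun c => !pvP c)).filter pvQ).map (·.1)).reverse,
          String.ofList (((k1.reverse.dropWhile (fun c => !pvP c)).filter pvQ).map (·.2)).reverse)] := by
    have hflat : cols.foldl pvStepA ((0 : Int), ([] : List Char), ([] : List Char))
        = fa.foldl (fun st p => (p.1.toList.zip p.2.toList).foldl pvStepA st) (0, [], []) :=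
      List.foldl_flatMap
    simp only [trimAlign, ← hflat, stepA_flag0, List.nil_append, String.toList_ofList,
      List.foldl_cons, List.foldl_nil]
    have hzip : ((k1.map (·.1)).reverse).zip ((k1.map (·.2)).reverse) = k1.reverse := by
      rw [← List.map_reverse, ← List.map_reverse, List.zip_map']
      simp
    rw [hzip]
  rw [hA]
  -- B's both list is the cast of pvIdxs
  have hboth : ((PySem.List.enumerate cols 0).filter
        (fun ic => decide (ic.2.1 ≠ '-' ∧ ic.2.2 ≠ '-'))).map (·.1)
      = (pvIdxs cols).map (fun (k : Nat) => (k : Int)) := by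
    rw [hPdef, pvIdxs_enumerate]
    simp
  rcases hi : pvIdxs cols with _ | ⟨m0, mr⟩
  · -- no fully non-gap column: both sides collapse to [("", "")]
    have hT : cols.dropWhile (fun c => !pvP c) = [] := by
      rw [List.dropWhile_eq_nil_iff]
      intro x hx
      simp [(pvIdxs_nil_iff cols).mp hi x hx]
    have hk1nil : k1 = [] := by rw [hk1, hT]; rfl
    rw [hk1nil]
    simp only [trimAlign_alt, ← hcols, hboth, hi, List.map_nil]
    rfl
  · -- fully non-gap columns exist between indices m0 and mr.getLastD m0
    simp only [trimAlign_alt, ← hcols, hboth, hi, List.map_cons]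
    have hlast : (mr.map (fun (k : Nat) => (k : Int))).getLastD (m0 : Int)
        = ((mr.getLastD m0 : Nat) : Int) := List.getLastD_map
    rw [hlast]
    rw [show ((mr.getLastD m0 : Nat) : Int) + 1 = ((mr.getLastD m0 + 1 : Nat) : Int) by push_cast; ring]
    rw [PySem.List.slice_natCast, hQdef]
    have hspan : (cols.drop m0).take (mr.getLastD m0 + 1 - m0)
        = ((cols.dropWhile (fun c => !pvP c)).reverse.dropWhile (fun c => !pvP c)).reverse :=
      (pv_main cols m0 mr hi).symm
    rw [show List.take (mr.getLastD m0 + 1 - m0) (List.drop m0 cols)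
        = (cols.drop m0).take (mr.getLastD m0 + 1 - m0) from rfl, hspan]
    -- identify the two column lists
    have hk1rev : k1.reverse = ((cols.dropWhile (fun c => !pvP c)).reverse).filter pvQ := by
      rw [hk1, ← List.filter_reverse]
    rw [hk1rev, pv_dropWhile_filter, List.filter_filter]
    simp [List.filter_reverse, List.map_reverse]

-- ===== VERDICT (by name: the statement is the Claim_ definition above) =====
theorem trimAlign_spec : Claim_equal_trimAlign := by
  intro fa _
  exact trimAlign_spec' fa
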